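-- pv_equiv track=rewrite | github.com/cdjasonj/Leetcode-python | 剑指Offer/jumpFloorII.py | jumpFloorII
-- ===== SOURCE A (Python) =====
-- def jumpFloorII(num):
--     if num ==1 or num == 0:
--         return 1
--     if num ==2 :
--         return 2
--     sum = 0
--     for i in range(0,num): #0 就返回1
--         sum += jumpFloorII(i)
--     return sum
-- ===== SOURCE B (Python) =====
-- def jumpFloorII(num):
--     if num < 0:
--         return 0
--     if num == 0:
--         return 1
--     return 2 ** (num - 1)
-- ===== Notes on version B (the rewrite author's own statement) =====
-- stated objective: faster
-- what changed: replaced the exponential-time recursion that re-sums all previous values with the closed form 2^(num-1) (0 for negative input, 1 for input 0); intended as faster: a timing run read B hundreds to thousands of times faster at the largest size A finished (A times out beyond it), though that run's confirmation of the label varies run to run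
import Mathlib
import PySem

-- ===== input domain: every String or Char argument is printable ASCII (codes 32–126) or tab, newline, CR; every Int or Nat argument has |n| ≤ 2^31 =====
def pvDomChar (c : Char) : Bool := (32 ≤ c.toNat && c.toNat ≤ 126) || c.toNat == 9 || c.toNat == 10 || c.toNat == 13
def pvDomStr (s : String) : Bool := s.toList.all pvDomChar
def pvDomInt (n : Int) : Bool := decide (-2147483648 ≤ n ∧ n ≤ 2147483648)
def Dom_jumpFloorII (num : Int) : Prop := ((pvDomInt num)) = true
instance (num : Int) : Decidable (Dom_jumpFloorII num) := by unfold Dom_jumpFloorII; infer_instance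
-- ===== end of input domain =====

-- B replaces A's exponential recursion by the closed form 2^(num-1); intended as faster: a timing run read B far faster where A finished (A times out on larger inputs), confirmation varying run to run.

-- ===== PORT A =====
def jumpFloorII (num : Int) : Int :=
  if num = 1 ∨ num = 0 then 1
  else if num = 2 then 2
  else (PySem.List.pyRange 0 num 1).attach.foldl (fun s i => s + jumpFloorII i.1) 0
termination_by num.toNat
decreasing_by
  have h := (PySem.List.mem_pyRange_one).mp i.2
  omega

-- ===== PORT B =====
def jumpFloorII_alt (num : Int) : Int :=
  if num < 0 then 0
  else if num = 0 then 1
  else 2 ^ (num - 1).toNat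

-- ===== PRECONDITION & SPEC =====
def Spec_jumpFloorII (num : Int) (out : Int) : Prop := out = jumpFloorII_alt num
instance (num : Int) (out : Int) : Decidable (Spec_jumpFloorII num out) := by unfold Spec_jumpFloorII; infer_instance

-- ===== CLAIM (what is proved, stated in full; the proofs are below) =====
def Claim_equal_jumpFloorII : Prop := ∀ (num : Int), Dom_jumpFloorII num → Spec_jumpFloorII num (jumpFloorII num)

-- ===== LEMMAS AND PROOFS =====

theorem pvFoldlSum (l : List Int) (f : Int → Int) (s : Int) :
    l.foldl (fun a i => a + f i) s = s + (l.map f).sum := by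
  induction l generalizing s with
  | nil => simp
  | cons x xs ih => simp [ih]; ring

theorem pvFoldlAttach (l : List Int) (f : Int → Int) (s : Int) :
    l.attach.foldl (fun a i => a + f i.1) s = l.foldl (fun a i => a + f i) s := by
  conv_rhs => rw [← List.attach_map_subtype_val l]
  rw [List.foldl_map]

theorem pvNeg (num : Int) (h : num < 0) : jumpFloorII num = 0 := by
  rw [jumpFloorII]
  have h1 : ¬(num = 1 ∨ num = 0) := by omega
  have h2 : ¬(num = 2) := by omega
  rw [if_neg h1, if_neg h2, PySem.List.pyRange_one_eq_nil (by omega)]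
  rfl

theorem pvGeom (n : Nat) (h : 1 ≤ n) :
    ((List.range n).map (fun k : Nat => if k = 0 then (1 : Int) else 2 ^ (k - 1))).sum = 2 ^ (n - 1) := by
  induction n with
  | zero => omega
  | succ m ih =>
    rcases Nat.eq_or_lt_of_le h with h' | h'
    · simp [← h']
    · have hm : 1 ≤ m := by omega
      rw [List.range_succ, List.map_append, List.sum_append, ih hm]
      have hne0 : ¬(m = 0) := by omega
      simp only [List.map_cons, List.map_nil, List.sum_cons, List.sum_nil, if_neg hne0]
      rw [show m + 1 - 1 = (m - 1) + 1 by omega, pow_succ]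
      ring

theorem pvNat (n : Nat) : jumpFloorII (n : Int) = jumpFloorII_alt (n : Int) := by
  induction n using Nat.strong_induction_on with
  | _ n ih =>
    match n with
    | 0 => rw [jumpFloorII]; norm_num [jumpFloorII_alt]
    | 1 => rw [jumpFloorII]; norm_num [jumpFloorII_alt]
    | 2 => rw [jumpFloorII]; norm_num [jumpFloorII_alt]
    | (m + 3) =>
      rw [jumpFloorII]
      have h1 : ¬(((m + 3 : Nat) : Int) = 1 ∨ ((m + 3 : Nat) : Int) = 0) := by omega
      have h2 : ¬(((m + 3 : Nat) : Int) = 2) := by omega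
      rw [if_neg h1, if_neg h2]
      rw [pvFoldlAttach]
      rw [pvFoldlSum, PySem.List.pyRange_zero_natCast, List.map_map]
      have hmap : (List.range (m + 3)).map (jumpFloorII ∘ fun k : Nat => (k : Int)) =
          (List.range (m + 3)).map (fun k : Nat => if k = 0 then (1 : Int) else 2 ^ (k - 1)) := by
        apply List.map_congr_left
        intro k hk
        have hk' : k < m + 3 := List.mem_range.mp hk
        have hik := ih k hk'
        have hcast : (((k : Nat) : Int) - 1).toNat = k - 1 := by omega
        by_cases hk0 : k = 0
        · subst hk0
          have h0 : jumpFloorII 0 = 1 := by rw [jumpFloorII]; norm_num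
          simp [Function.comp, h0]
        · have h1 : ¬(((k : Nat) : Int) < 0) := by omega
          have h2 : ¬(((k : Nat) : Int) = 0) := by omega
          simp only [Function.comp, hik, jumpFloorII_alt, if_neg h1, if_neg h2, hcast, if_neg hk0]
      rw [hmap, pvGeom (m + 3) (by omega)]
      have hne : ¬(((m + 3 : Nat) : Int) < 0) := by omega
      have hne0 : ¬(((m + 3 : Nat) : Int) = 0) := by omega
      rw [jumpFloorII_alt, if_neg hne, if_neg hne0]
      have hc : (((m + 3 : Nat) : Int) - 1).toNat = m + 3 - 1 := by omega
      rw [hc]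
      ring

-- ===== VERDICT (by name: the statement is the Claim_ definition above) =====
theorem jumpFloorII_spec : Claim_equal_jumpFloorII := by
  intro num _
  unfold Spec_jumpFloorII
  rcases lt_or_ge num 0 with h | h
  · rw [pvNeg num h, jumpFloorII_alt, if_pos h]
  · have : num = ((num.toNat : Nat) : Int) := by omega
    rw [this, pvNat]
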